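-- pv_equiv track=rewrite | github.com/hyunjik11/advent-of-code-2024 | day25.py | convert_pattern_to_int
-- ===== SOURCE A (Python) =====
-- def convert_pattern_to_int(arr: list[list[str]], type: str) -> list[int]:
--   """Convert array of key/lock characters to list of ints."""
--   if type == 'lock':
--     arr = arr[1:]  # Ignore first line
--   elif type == 'key':
--     arr = arr[:-1]  # Ignore last line
--   else:
--     raise ValueError(f'Invalid {type=}')
--   nrow = len(arr)
--   out = []
--   for j in range(len(arr[0])):
--     col = [arr[i][j] for i in range(nrow)]
--     height = sum([x == '#' for x in col])
--     out.append(height)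
--   return out
-- ===== SOURCE B (Python) =====
-- def convert_pattern_to_int(arr: list[list[str]], type: str) -> list[int]:
--   """Convert array of key/lock characters to list of ints."""
--   if type == 'lock':
--     rows = arr[1:]  # Ignore first line
--   elif type == 'key':
--     rows = arr[:-1]  # Ignore last line
--   else:
--     raise ValueError(f'Invalid {type=}')
--   out = [0] * len(rows[0])
--   for row in rows:
--     for j, x in enumerate(row[:len(out)]):
--       if x == '#':
--         out[j] += 1
--   return out
-- ===== Notes on version B (the rewrite author's own statement) =====
-- stated objective: alternative
-- what changed: Column-major gather (build each column, sum its '#' marks) replaced by a row-major single sweep maintaining a per-column counter vector that is incremented in place.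
import Mathlib
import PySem

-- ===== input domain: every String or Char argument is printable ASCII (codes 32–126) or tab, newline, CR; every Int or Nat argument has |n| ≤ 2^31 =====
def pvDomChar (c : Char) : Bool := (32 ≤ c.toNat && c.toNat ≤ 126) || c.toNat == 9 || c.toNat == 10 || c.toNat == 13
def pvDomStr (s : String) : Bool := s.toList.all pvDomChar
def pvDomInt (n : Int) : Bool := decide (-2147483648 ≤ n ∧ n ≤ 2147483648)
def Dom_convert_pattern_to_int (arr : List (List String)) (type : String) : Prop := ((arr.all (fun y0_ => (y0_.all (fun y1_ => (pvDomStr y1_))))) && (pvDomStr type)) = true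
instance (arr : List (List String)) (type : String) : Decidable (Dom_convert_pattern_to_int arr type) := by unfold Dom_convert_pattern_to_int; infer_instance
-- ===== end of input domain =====

-- B replaces A's column-major gather (build each column, count '#') by a row-major sweep
-- over the trimmed rows that increments a per-column counter vector in place (objective: alternative).


-- ===== PORT A =====
def convert_pattern_to_int (arr : List (List String)) (type : String) : List Int :=
  let arr2 := if type = "lock" then PySem.List.slice arr (some 1) none
              else if type = "key" then PySem.List.slice arr none (some (-1))
              else []   -- raise ValueError: excluded by Pre_
  let nrow : Int := arr2.length
  (PySem.List.pyRange 0 ((PySem.List.pyGetD arr2 0 []).length : Int) 1).foldl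
    (fun out j =>
      let col := (PySem.List.pyRange 0 nrow 1).map
        (fun i => PySem.List.pyGetD (PySem.List.pyGetD arr2 i []) j "")
      let height : Int := (col.map (fun x => if x = "#" then (1 : Int) else 0)).sum
      out ++ [height]) []

-- ===== PORT B =====
def convert_pattern_to_int_alt (arr : List (List String)) (type : String) : List Int :=
  let rows := if type = "lock" then PySem.List.slice arr (some 1) none
              else if type = "key" then PySem.List.slice arr none (some (-1))
              else []   -- raise ValueError: excluded by Pre_
  let width := (PySem.List.pyGetD rows 0 []).length
  rows.foldl
    (fun out row =>
      (PySem.List.enumerate (PySem.List.slice row none (some (out.length : Int))) 0).foldl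
        (fun o p => if p.2 = "#" then PySem.List.pySetD o p.1 (PySem.List.pyGetD o p.1 0 + 1) else o)
        out)
    (List.replicate width (0 : Int))

-- ===== PRECONDITION & SPEC =====
-- the trimmed grid both programs work on
def pvTrim (arr : List (List String)) (type : String) : List (List String) :=
  if type = "lock" then arr.tail else arr.dropLast

-- Pre_ = exactly where A returns: a valid type, a nonempty trimmed grid, and no trimmed row
-- shorter than the first (else arr[i][j] raises IndexError).
def Pre_convert_pattern_to_int (arr : List (List String)) (type : String) : Prop :=
  (type = "lock" ∨ type = "key") ∧
  pvTrim arr type ≠ [] ∧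
  ∀ r ∈ pvTrim arr type, ((pvTrim arr type).headD []).length ≤ r.length
instance (arr : List (List String)) (type : String) : Decidable (Pre_convert_pattern_to_int arr type) := by unfold Pre_convert_pattern_to_int; infer_instance

def pvWitness_convert_pattern_to_int : List (List String) × String :=
  ([["#", "#"], ["#", "."], [".", "."]], "lock")

def Spec_convert_pattern_to_int (arr : List (List String)) (type : String) (out : List Int) : Prop := out = convert_pattern_to_int_alt arr type
instance (arr : List (List String)) (type : String) (out : List Int) : Decidable (Spec_convert_pattern_to_int arr type out) := by unfold Spec_convert_pattern_to_int; infer_instance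

-- ===== CLAIM (what is proved, stated in full; the proofs are below) =====
def Claim_equal_convert_pattern_to_int : Prop := ∀ (arr : List (List String)) (type : String), Dom_convert_pattern_to_int arr type → Pre_convert_pattern_to_int arr type → Spec_convert_pattern_to_int arr type (convert_pattern_to_int arr type)

-- ===== LEMMAS AND PROOFS =====

-- number of '#' in column j of the grid
def colSum (rows : List (List String)) (j : Nat) : Int :=
  (rows.map (fun r => if r.getD j "" = "#" then (1 : Int) else 0)).sum

-- B's inner loop over one row of exactly-in-range characters: pointwise increment
lemma enum_fold_spec (cs : List String) : ∀ (out : List Int) (s : Nat),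
    s + cs.length ≤ out.length →
    (((PySem.List.enumerate cs (s : Int)).foldl
        (fun o p => if p.2 = "#" then PySem.List.pySetD o p.1 (PySem.List.pyGetD o p.1 0 + 1) else o)
        out).length = out.length ∧
     ∀ j, ((PySem.List.enumerate cs (s : Int)).foldl
        (fun o p => if p.2 = "#" then PySem.List.pySetD o p.1 (PySem.List.pyGetD o p.1 0 + 1) else o)
        out).getD j 0
      = out.getD j 0 + (if s ≤ j ∧ j < s + cs.length then (if cs.getD (j - s) "" = "#" then 1 else 0) else 0)) := by
  induction cs with
  | nil =>
    intro out s _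
    refine ⟨rfl, fun j => ?_⟩
    simp [PySem.List.enumerate]
  | cons c cs ih =>
    intro out s hlen
    simp only [List.length_cons] at hlen
    rw [PySem.List.enumerate_cons]
    have hstep : ((s : Int) + 1) = ((s + 1 : Nat) : Int) := by push_cast; ring
    simp only [List.foldl_cons]
    set out' : List Int := if c = "#" then PySem.List.pySetD out (s : Int) (PySem.List.pyGetD out (s : Int) 0 + 1) else out with hout'
    have hlen' : out'.length = out.length := by
      rw [hout']; split <;> simp [PySem.List.pySetD_natCast]
    have ih' := ih out' (s + 1) (by rw [hlen']; omega)
    rw [hstep]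
    refine ⟨by rw [ih'.1, hlen'], fun j => ?_⟩
    rw [ih'.2 j]
    have hov : out'.getD j 0 = out.getD j 0 + (if j = s ∧ c = "#" then 1 else 0) := by
      rw [hout']
      by_cases hc : c = "#"
      · simp only [hc, if_true, PySem.List.pySetD_natCast, PySem.List.pyGetD_natCast]
        rw [List.getD_eq_getElem?_getD, List.getD_eq_getElem?_getD, List.getD_eq_getElem?_getD,
            List.getElem?_set]
        by_cases hj : j = s
        · subst hj
          simp [show j < out.length by omega]
        · simp [hj, Ne.symm hj]
      · simp [hc]
    rw [hov]
    by_cases h1 : j = s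
    · subst h1
      have hno : ¬ (j + 1 ≤ j ∧ j < j + 1 + cs.length) := by omega
      have hyes : j ≤ j ∧ j < j + (cs.length + 1) := by omega
      simp only [List.length_cons, hno, if_false, hyes, and_self, if_true, Nat.sub_self,
        List.getD_cons_zero, add_zero]
      ring_nf
      split <;> simp_all
    · simp only [List.length_cons]
      by_cases h2 : s + 1 ≤ j ∧ j < s + 1 + cs.length
      · have hj : s ≤ j ∧ j < s + (cs.length + 1) := by omega
        have hsub : j - s = (j - (s + 1)) + 1 := by omega
        simp [h2, hj, h1, hsub]
      · have hj : ¬ (s ≤ j ∧ j < s + (cs.length + 1)) := by omega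
        simp only [hj, if_false, h2, h1, add_zero]
        simp

-- B's outer fold over rows adds colSum pointwise
lemma rows_fold_spec (rows : List (List String)) : ∀ (out : List Int),
    (∀ r ∈ rows, out.length ≤ r.length) →
    ((rows.foldl
        (fun out row =>
          (PySem.List.enumerate (PySem.List.slice row none (some (out.length : Int))) 0).foldl
            (fun o p => if p.2 = "#" then PySem.List.pySetD o p.1 (PySem.List.pyGetD o p.1 0 + 1) else o)
            out) out).length = out.length ∧
     ∀ j < out.length, (rows.foldl
        (fun out row =>
          (PySem.List.enumerate (PySem.List.slice row none (some (out.length : Int))) 0).foldl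
            (fun o p => if p.2 = "#" then PySem.List.pySetD o p.1 (PySem.List.pyGetD o p.1 0 + 1) else o)
            out) out).getD j 0 = out.getD j 0 + colSum rows j) := by
  induction rows with
  | nil => intro out _; exact ⟨rfl, fun j _ => by simp [colSum]⟩
  | cons row rows ih =>
    intro out hw
    simp only [List.foldl_cons]
    have hrow : out.length ≤ row.length := hw row (by simp)
    have htake : PySem.List.slice row none (some (out.length : Int)) = row.take out.length :=
      PySem.List.slice_to_natCast row out.length
    have h1 := enum_fold_spec (row.take out.length) out 0
      (by simp only [List.length_take]; omega)
    simp only [Nat.cast_zero] at h1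
    rw [htake]
    set out' := (PySem.List.enumerate (row.take out.length) (0 : Int)).foldl
        (fun o p => if p.2 = "#" then PySem.List.pySetD o p.1 (PySem.List.pyGetD o p.1 0 + 1) else o)
        out with hdef
    have hlen' : out'.length = out.length := h1.1
    have ih' := ih out' (fun r hr => by rw [hlen']; exact hw r (by simp [hr]))
    refine ⟨by rw [ih'.1, hlen'], fun j hj => ?_⟩
    rw [ih'.2 j (by omega), h1.2 j]
    have hjlt : 0 ≤ j ∧ j < 0 + (row.take out.length).length := by
      exact ⟨Nat.zero_le j, by simp only [List.length_take]; omega⟩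
    have hget : (row.take out.length).getD (j - 0) "" = row.getD j "" := by
      simp only [Nat.sub_zero]
      rw [List.getD_eq_getElem?_getD, List.getD_eq_getElem?_getD, List.getElem?_take,
          if_pos (by omega)]
    simp only [hjlt, and_self, if_true, hget, colSum, List.map_cons, List.sum_cons]
    ring

-- A's result is the map of column sums
lemma a_char (rows : List (List String)) :
    (PySem.List.pyRange 0 ((PySem.List.pyGetD rows 0 []).length : Int) 1).foldl
      (fun out j =>
        out ++ [((((PySem.List.pyRange 0 (rows.length : Int) 1).map
            (fun i => PySem.List.pyGetD (PySem.List.pyGetD rows i []) j "")).map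
            (fun x => if x = "#" then (1 : Int) else 0)).sum : Int)]) []
    = (List.range (PySem.List.pyGetD rows 0 []).length).map (fun j => colSum rows j) := by
  rw [PySem.List.foldl_append_singleton_eq_map, List.nil_append,
      PySem.List.pyRange_zero_natCast ((PySem.List.pyGetD rows 0 []).length), List.map_map]
  refine List.map_congr_left (fun k _ => ?_)
  have hcol : (PySem.List.pyRange 0 (rows.length : Int) 1).map
      (fun i => PySem.List.pyGetD (PySem.List.pyGetD rows i []) ((k : Nat) : Int) "")
      = rows.map (fun r => PySem.List.pyGetD r ((k : Nat) : Int) "") := by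
    have hsplit : (fun i => PySem.List.pyGetD (PySem.List.pyGetD rows i []) ((k : Nat) : Int) "")
        = (fun r => PySem.List.pyGetD r ((k : Nat) : Int) "") ∘ (fun i => PySem.List.pyGetD rows i []) := rfl
    rw [hsplit, ← List.map_map,
        PySem.List.map_pyGetD_pyRange_zero' (xs := rows) (d := ([] : List String))]
  simp only [Function.comp_apply, List.map_map, colSum]
  congr 1
  rw [← List.map_map, hcol, List.map_map]
  refine List.map_congr_left (fun r _ => ?_)
  simp [PySem.List.pyGetD_natCast]

-- ===== VERDICT (by name: the statement is the Claim_ definition above) =====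
theorem convert_pattern_to_int_spec : Claim_equal_convert_pattern_to_int := by
  intro arr type _ hpre
  obtain ⟨hty, hne, hwid⟩ := hpre
  unfold Spec_convert_pattern_to_int convert_pattern_to_int convert_pattern_to_int_alt
  have htrim : (if type = "lock" then PySem.List.slice arr (some 1) none
                else if type = "key" then PySem.List.slice arr none (some (-1))
                else []) = pvTrim arr type := by
    unfold pvTrim
    rcases hty with h | h <;> simp [h, PySem.List.slice_from_one, PySem.List.slice_to_neg_one]
  simp only [htrim]
  set rows := pvTrim arr type with hrows
  set w := (PySem.List.pyGetD rows 0 []).length with hw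
  have hw' : w = (rows.headD []).length := by
    rw [hw, PySem.List.pyGetD_zero]
    cases rows <;> simp
  have hB := rows_fold_spec rows (List.replicate w (0 : Int))
    (fun r hr => by simpa [hw'] using hwid r hr)
  rw [a_char rows]
  have hlenB := hB.1
  refine List.ext_getElem (by rw [List.length_map, List.length_range, hlenB, List.length_replicate]) (fun j h1 h2 => ?_)
  have hjw : j < w := by simpa using h1
  have hgB := hB.2 j (by simpa using hjw)
  have hgB' := hgB
  rw [List.getD_eq_getElem?_getD, List.getElem?_eq_getElem h2,
      Option.getD_some] at hgB'
  rw [List.getElem_map, List.getElem_range, hgB']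
  simp [List.getD_eq_getElem?_getD, hjw]
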